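-- pv_equiv track=rewrite | github.com/deesdav/pro-pra-py | python.examples/word_chain.py | prep_counter
-- ===== SOURCE A (Python) =====
-- def prep_counter(words, index):
--     counter = {}
--     for word in words:
--         char = word[index]
--         if char in counter.keys():
--             counter[char] += 1
--         else:
--             counter[char] = 1
--     return counter
-- ===== SOURCE B (Python) =====
-- def prep_counter(words, index):
--     chars = [word[index] for word in words]
--     return {c: chars.count(c) for c in dict.fromkeys(chars)}
-- ===== Notes on version B (the rewrite author's own statement) =====
-- stated objective: simpler
-- what changed: B replaces A's stateful if/else counting loop over a mutating dict with one comprehension extracting the chars and a dict comprehension over dict.fromkeys(chars) pairing each distinct char with chars.count(c).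
import Mathlib
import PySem

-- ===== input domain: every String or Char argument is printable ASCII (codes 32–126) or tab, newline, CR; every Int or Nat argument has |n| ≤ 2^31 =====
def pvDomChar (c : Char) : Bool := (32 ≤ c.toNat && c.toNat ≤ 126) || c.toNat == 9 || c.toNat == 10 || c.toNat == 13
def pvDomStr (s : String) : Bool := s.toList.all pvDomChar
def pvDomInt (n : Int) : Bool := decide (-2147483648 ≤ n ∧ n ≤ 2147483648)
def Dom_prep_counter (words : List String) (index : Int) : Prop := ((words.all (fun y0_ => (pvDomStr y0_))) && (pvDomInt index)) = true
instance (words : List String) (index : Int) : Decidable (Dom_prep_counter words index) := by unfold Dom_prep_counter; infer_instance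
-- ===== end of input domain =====

-- B replaces A's incremental if/else counting dict with one pass extracting the characters
-- followed by a dict comprehension over their ordered deduplication, each key paired with
-- chars.count(c); objective: simpler (no faster: same order of cost on these inputs).

-- ===== PORT A =====
-- word[index] is a 1-character string in Python; we model it as String.ofList [c].
-- The .getD ' ' default is never used under Pre_ (the index is in range for every word).
def prep_counter (words : List String) (index : Int) : List (String × Int) :=
  (words.foldl (fun counter word =>
      let char : String := String.ofList [PySem.List.pyGetD word.toList index ' ']
      if counter.contains char then
        counter.insert char (counter.getD char 0 + 1)
      else
        counter.insert char 1)
    PySem.Dict.empty).items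

-- ===== PORT B =====
def prep_counter_alt (words : List String) (index : Int) : List (String × Int) :=
  let chars : List String :=
    words.map (fun word => String.ofList [PySem.List.pyGetD word.toList index ' '])
  ((PySem.List.dedup chars).foldl
      (fun d c => d.insert c ((chars.count c : Int)))
      PySem.Dict.empty).items

-- ===== PRECONDITION & SPEC =====
-- A raises IndexError when index is out of range for some word; exactly those inputs are excluded.
def Pre_prep_counter (words : List String) (index : Int) : Prop :=
  ∀ word ∈ words, PySem.Raise.InRange word.toList.length index

instance (words : List String) (index : Int) : Decidable (Pre_prep_counter words index) := by
  unfold Pre_prep_counter; infer_instance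

def pvWitness_prep_counter : List String × Int := (["cat", "cow", "dog"], 0)

def Spec_prep_counter (words : List String) (index : Int) (out : List (String × Int)) : Prop := out = prep_counter_alt words index
instance (words : List String) (index : Int) (out : List (String × Int)) : Decidable (Spec_prep_counter words index out) := by unfold Spec_prep_counter; infer_instance

-- ===== CLAIM (what is proved, stated in full; the proofs are below) =====
def Claim_equal_prep_counter : Prop := ∀ (words : List String) (index : Int), Dom_prep_counter words index → Pre_prep_counter words index → Spec_prep_counter words index (prep_counter words index)

-- ===== LEMMAS AND PROOFS =====

-- A's if/else body is exactly one unconditional 'insert char (getD char 0 + 1)' step.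
theorem prep_counter_step_eq (counter : PySem.Dict String Int) (char : String) :
    (if counter.contains char then
        counter.insert char (counter.getD char 0 + 1)
      else
        counter.insert char 1)
      = counter.insert char (counter.getD char 0 + 1) := by
  by_cases h : counter.contains char = true
  · simp [h]
  · simp only [Bool.not_eq_true] at h
    simp [h, PySem.Dict.getD_of_not_contains counter 0 h]

-- Both ports' dicts have the same items: counter-of-chars on the A side,
-- fresh inserts over the deduplicated chars on the B side.
theorem prep_counter_eq_alt (words : List String) (index : Int) :
    prep_counter words index = prep_counter_alt words index := by
  unfold prep_counter prep_counter_alt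
  have hA : (words.foldl (fun counter word =>
      let char : String := String.ofList [PySem.List.pyGetD word.toList index ' ']
      if counter.contains char then
        counter.insert char (counter.getD char 0 + 1)
      else
        counter.insert char 1)
    PySem.Dict.empty)
      = PySem.Dict.counter
          (words.map (fun word => String.ofList [PySem.List.pyGetD word.toList index ' '])) := by
    rw [← PySem.Dict.foldl_insert_getD_add_one_eq_counter, List.foldl_map]
    congr 1
    funext counter word
    exact prep_counter_step_eq counter _
  rw [hA, PySem.Dict.items_counter]
  set chars := words.map (fun word => String.ofList [PySem.List.pyGetD word.toList index ' ']) with hch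
  rw [PySem.Dict.items_foldl_insert_fresh (PySem.List.dedup chars) (fun c => c)
        (fun c => ((chars.count c : Int))) PySem.Dict.empty
        (by intro a _; simp [PySem.Dict.contains_empty])
        (by simp)]
  simp [PySem.List.dedup_eq_ofList, PySem.Dict.empty]

-- ===== VERDICT (by name: the statement is the Claim_ definition above) =====
theorem prep_counter_spec : Claim_equal_prep_counter := by
  intro words index _ _
  unfold Spec_prep_counter
  exact prep_counter_eq_alt words index
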